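-- pv_equiv track=rewrite | github.com/QINGTANS/agent-type-identification | agentTypeIdentification/cluster_algorithms.py | get_activity_matrix
-- ===== SOURCE A (Python) =====
-- def get_activity_matrix(diff_task_list, diff_resource_list, frequency_map):
--     # activity_matrix_dic = {agent_1: [0 ,4, 8, ...], agent_2: [...], ...}
--     # elements in [0, 4, 8, ...] is the same task order as in diff_task_list
--     activity_matrix_dic = {}
--     for resource in diff_resource_list:
--         task_freq_list = []
--         for task in diff_task_list:
--             if (task, resource) in frequency_map:
--                 task_freq_list.append(frequency_map[(task, resource)])
--             else:
--                 task_freq_list.append(0)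
--         activity_matrix_dic[resource] = task_freq_list
--     return activity_matrix_dic
-- ===== SOURCE B (Python) =====
-- def get_activity_matrix(diff_task_list, diff_resource_list, frequency_map):
--     # Scatter from the sparse frequency_map instead of probing it for every cell:
--     # zero-fill all rows, index task positions once, then one pass over the map.
--     n = len(diff_task_list)
--     matrix = {}
--     for resource in diff_resource_list:
--         matrix[resource] = [0] * n
--     positions = {}
--     for i, task in enumerate(diff_task_list):
--         positions.setdefault(task, []).append(i)
--     valid = set(diff_resource_list)
--     for (task, resource), value in frequency_map.items():
--         if resource in valid and task in positions:
--             row = matrix[resource]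
--             for i in positions[task]:
--                 row[i] = value
--     return matrix
-- ===== Notes on version B (the rewrite author's own statement) =====
-- stated objective: faster
-- what changed: Instead of probing the frequency dict for every (task, resource) cell, B zero-fills all rows, precomputes each task's index positions and the resource set, and scatters the sparse frequency_map entries into the matrix in one pass.
import Mathlib
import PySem

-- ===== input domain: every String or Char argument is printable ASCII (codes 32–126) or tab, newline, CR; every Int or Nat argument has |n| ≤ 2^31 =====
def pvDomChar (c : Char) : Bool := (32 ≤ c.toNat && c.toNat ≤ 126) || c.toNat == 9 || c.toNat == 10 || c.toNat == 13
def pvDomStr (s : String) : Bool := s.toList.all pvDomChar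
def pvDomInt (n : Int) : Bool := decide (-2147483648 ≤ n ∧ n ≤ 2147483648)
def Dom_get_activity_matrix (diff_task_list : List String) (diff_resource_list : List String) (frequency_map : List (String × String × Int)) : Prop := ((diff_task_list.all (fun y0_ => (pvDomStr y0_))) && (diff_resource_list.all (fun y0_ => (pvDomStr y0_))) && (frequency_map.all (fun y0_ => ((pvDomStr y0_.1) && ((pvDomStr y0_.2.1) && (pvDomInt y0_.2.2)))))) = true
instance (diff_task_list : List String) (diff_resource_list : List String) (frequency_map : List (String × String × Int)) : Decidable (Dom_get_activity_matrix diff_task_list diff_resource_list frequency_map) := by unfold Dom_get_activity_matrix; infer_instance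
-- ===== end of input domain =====

-- ===== PORT A =====
-- B scatters the sparse frequency_map into zero-filled rows instead of probing it per cell (measured-speed claim is recorded by the check, not here).
def get_activity_matrix (diff_task_list : List String) (diff_resource_list : List String) (frequency_map : List (String × String × Int)) : List (String × List Int) :=
  -- frequency_map is a Python dict keyed by (task, resource): realised as PySem.Dict built in insertion order
  let fdict : PySem.Dict (String × String) Int :=
    PySem.Dict.ofList (frequency_map.map (fun p => ((p.1, p.2.1), p.2.2)))
  let activity_matrix_dic : PySem.Dict String (List Int) :=
    diff_resource_list.foldl (fun acc resource =>
      let task_freq_list : List Int :=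
        diff_task_list.foldl (fun task_freq_list task =>
          if fdict.contains (task, resource) then task_freq_list ++ [fdict.getD (task, resource) 0]
          else task_freq_list ++ [0]) []
      acc.insert resource task_freq_list) PySem.Dict.empty
  activity_matrix_dic.items

-- ===== PORT B =====
def get_activity_matrix_alt (diff_task_list : List String) (diff_resource_list : List String) (frequency_map : List (String × String × Int)) : List (String × List Int) :=
  let n := diff_task_list.length
  let matrix : PySem.Dict String (List Int) :=
    diff_resource_list.foldl (fun d resource => d.insert resource (List.replicate n 0)) PySem.Dict.empty
  let positions : PySem.Dict String (List Int) :=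
    (PySem.List.enumerate diff_task_list).foldl (fun d p => d.modify p.2 [] (fun l => l ++ [p.1])) PySem.Dict.empty
  let valid : PySem.Set String := PySem.Set.ofList diff_resource_list
  let final : PySem.Dict String (List Int) :=
    frequency_map.foldl (fun m q =>
      if PySem.Set.contains valid q.2.1 && positions.contains q.1 then
        m.modify q.2.1 [] (fun row =>
          (positions.getD q.1 []).foldl (fun row i => PySem.List.pySetD row i q.2.2) row)
      else m) matrix
  final.items

-- ===== PRECONDITION & SPEC =====
def Spec_get_activity_matrix (diff_task_list : List String) (diff_resource_list : List String) (frequency_map : List (String × String × Int)) (out : List (String × List Int)) : Prop := out = get_activity_matrix_alt diff_task_list diff_resource_list frequency_map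
instance (diff_task_list : List String) (diff_resource_list : List String) (frequency_map : List (String × String × Int)) (out : List (String × List Int)) : Decidable (Spec_get_activity_matrix diff_task_list diff_resource_list frequency_map out) := by unfold Spec_get_activity_matrix; infer_instance

-- ===== CLAIM (what is proved, stated in full; the proofs are below) =====
def Claim_equal_get_activity_matrix : Prop := ∀ (diff_task_list : List String) (diff_resource_list : List String) (frequency_map : List (String × String × Int)), Dom_get_activity_matrix diff_task_list diff_resource_list frequency_map → Spec_get_activity_matrix diff_task_list diff_resource_list frequency_map (get_activity_matrix diff_task_list diff_resource_list frequency_map)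

-- ===== LEMMAS AND PROOFS =====

-- build-a-dict-of-computed-rows: lookup after folding inserts whose value depends only on the key
theorem getD_foldl_insert_fun {ν : Type} (l : List String) (f : String → ν) (d : PySem.Dict String ν) (k : String) (d0 : ν) :
    (l.foldl (fun d r => d.insert r (f r)) d).getD k d0 = if k ∈ l then f k else d.getD k d0 := by
  induction l generalizing d with
  | nil => simp
  | cons r l ih =>
    simp only [List.foldl_cons, ih]
    by_cases hk : k ∈ l
    · simp [hk]
    · by_cases hkr : k = r
      · subst hkr; simp [hk, PySem.Dict.getD_insert_self]
      · simp [hk, hkr, PySem.Dict.getD_insert]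

-- pointwise description of a fold writing v at a list of non-negative indices
theorem getElem?_foldl_pySetD (ixs : List Int) (row : List Int) (v : Int) (j : Nat)
    (hnn : ∀ i ∈ ixs, 0 ≤ i) :
    (ixs.foldl (fun r i => PySem.List.pySetD r i v) row)[j]? =
      if (j : Int) ∈ ixs then (if j < row.length then some v else none) else row[j]? := by
  induction ixs generalizing row with
  | nil => simp
  | cons i ixs ih =>
    have h0 : 0 ≤ i := hnn i (List.mem_cons_self ..)
    simp only [List.foldl_cons]
    rw [ih _ (fun i hi => hnn i (List.mem_cons_of_mem _ hi)),
        PySem.List.pySetD_of_nonneg (h := h0)]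
    by_cases hj : (j : Int) ∈ ixs
    · simp [hj, List.mem_cons]
    · by_cases hji : (j : Int) = i
      · have hij : i.toNat = j := by omega
        simp [hji, List.mem_cons, hij, List.getElem?_set]
      · have hij : i.toNat ≠ j := by omega
        simp [hj, hji, List.mem_cons, hij]


-- proof-side names for B's internal structures
def posDict (tasks : List String) : PySem.Dict String (List Int) :=
  (PySem.List.enumerate tasks).foldl (fun d p => d.modify p.2 [] (fun l => l ++ [p.1])) PySem.Dict.empty

def posList (tasks : List String) (t : String) : List Int :=
  (((PySem.List.enumerate tasks).map Prod.swap).filter (fun p => p.1 == t)).map (·.2)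

def bstep (tasks res : List String) (m : PySem.Dict String (List Int)) (q : String × String × Int) :
    PySem.Dict String (List Int) :=
  if PySem.Set.contains (PySem.Set.ofList res) q.2.1 && (posDict tasks).contains q.1 then
    m.modify q.2.1 [] (fun row =>
      ((posDict tasks).getD q.1 []).foldl (fun row i => PySem.List.pySetD row i q.2.2) row)
  else m

-- the common canonical value of both ports
def canon (tasks res : List String) (fd : PySem.Dict (String × String) Int) : List (String × List Int) :=
  (PySem.Set.ofList res).map (fun r => (r, tasks.map (fun t => fd.getD (t, r) 0)))

theorem posDict_contains (tasks : List String) (t : String) :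
    (posDict tasks).contains t = decide (t ∈ tasks) := by
  rw [PySem.Dict.contains_eq_decide_mem_keys]
  unfold posDict
  rw [PySem.Dict.keys_foldl_modify_key (key := fun p : Int × String => p.2)]
  simp [PySem.List.map_snd_enumerate, PySem.Set.update_nil_left, PySem.Set.mem_ofList]

theorem posDict_getD (tasks : List String) (t : String) :
    (posDict tasks).getD t [] = posList tasks t := by
  have h1 : (PySem.List.enumerate tasks).foldl
        (fun d p => d.modify p.2 [] (fun l => l ++ [p.1])) PySem.Dict.empty
      = ((PySem.List.enumerate tasks).map Prod.swap).foldl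
        (fun d p => d.modify p.1 [] (fun l => l ++ [p.2])) PySem.Dict.empty := by
    rw [List.foldl_map]
    rfl
  unfold posDict posList
  rw [h1, PySem.Dict.getD_foldl_modify_append]
  simp

theorem mem_posList (tasks : List String) (t : String) (j : Nat) :
    ((j : Int) ∈ posList tasks t) ↔ ∃ h : j < tasks.length, tasks[j] = t := by
  unfold posList
  constructor
  · intro hmem
    obtain ⟨p, hp, hj⟩ := List.mem_map.1 hmem
    obtain ⟨hp1, hp2⟩ := List.mem_filter.1 hp
    obtain ⟨q, hq, rfl⟩ := List.mem_map.1 hp1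
    obtain ⟨k, hk, rfl⟩ := (PySem.List.mem_enumerate_iff _ _ _).1 hq
    simp only [Prod.swap, beq_iff_eq] at hp2 hj
    have hkj : k = j := by omega
    subst hkj
    exact ⟨hk, hp2⟩
  · rintro ⟨hj, ht⟩
    refine List.mem_map.2 ⟨(tasks[j], ((0 : Int) + j)),
      List.mem_filter.2 ⟨List.mem_map.2 ⟨(((0 : Int) + j), tasks[j]),
        (PySem.List.mem_enumerate_iff _ _ _).2 ⟨j, hj, rfl⟩, rfl⟩, by simp [ht]⟩, by simp⟩

theorem posList_nonneg (tasks : List String) (t : String) : ∀ i ∈ posList tasks t, 0 ≤ i := by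
  intro i hi
  unfold posList at hi
  obtain ⟨p, hp, hj⟩ := List.mem_map.1 hi
  obtain ⟨hp1, -⟩ := List.mem_filter.1 hp
  obtain ⟨q, hq, rfl⟩ := List.mem_map.1 hp1
  obtain ⟨k, hk, rfl⟩ := (PySem.List.mem_enumerate_iff _ _ _).1 hq
  simp only [Prod.swap] at hj
  omega

-- scattering v at all positions of t0 rewrites exactly the matching cells of a mapped row
theorem rowUpd_map (tasks : List String) (t0 : String) (v : Int) (h : String → Int) :
    (posList tasks t0).foldl (fun r i => PySem.List.pySetD r i v) (tasks.map h) =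
      tasks.map (fun t => if t = t0 then v else h t) := by
  apply List.ext_getElem?
  intro j
  rw [getElem?_foldl_pySetD _ _ _ _ (posList_nonneg tasks t0)]
  by_cases hj : j < tasks.length
  · by_cases hm : tasks[j] = t0
    · have hin : (j : Int) ∈ posList tasks t0 := (mem_posList tasks t0 j).2 ⟨hj, hm⟩
      simp [hin, hj, hm]
    · have hnin : ¬ (j : Int) ∈ posList tasks t0 := by
        intro hc; exact hm (((mem_posList tasks t0 j).1 hc).2)
      simp [hnin, hj, hm]
  · have hnin : ¬ (j : Int) ∈ posList tasks t0 := by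
      intro hc; exact hj ((mem_posList tasks t0 j).1 hc).1
    simp [hnin, hj]

-- A's inner gather loop is the row of lookups
theorem rowA_eq_map (tasks : List String) (fd : PySem.Dict (String × String) Int) (r : String) :
    tasks.foldl (fun row t =>
        if fd.contains (t, r) then row ++ [fd.getD (t, r) 0] else row ++ [0]) [] =
      tasks.map (fun t => fd.getD (t, r) 0) := by
  have hfun : (fun (row : List Int) t =>
      if fd.contains (t, r) then row ++ [fd.getD (t, r) 0] else row ++ [0]) =
      fun row t => row ++ [fd.getD (t, r) 0] := by
    funext row t
    by_cases hc : fd.contains (t, r) = true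
    · simp [hc]
    · simp [hc, PySem.Dict.getD_of_not_contains _ _ (by simpa using hc)]
  rw [hfun, PySem.List.foldl_append_singleton_eq_map]
  simp

-- port A computes the canonical value
theorem portA_eq_canon (tasks res : List String) (fmap : List (String × String × Int)) :
    get_activity_matrix tasks res fmap =
      canon tasks res (PySem.Dict.ofList (fmap.map (fun p => ((p.1, p.2.1), p.2.2)))) := by
  unfold get_activity_matrix canon
  rw [PySem.Dict.items_eq_map_keys _ (PySem.Dict.nodup_keys_foldl_insert _ _ _ PySem.Dict.nodup_keys_empty) []]
  rw [PySem.Dict.keys_foldl_insert, PySem.Dict.keys_empty, PySem.Set.update_nil_left]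
  apply List.map_congr_left
  intro r hr
  rw [getD_foldl_insert_fun res _ PySem.Dict.empty r []]
  rw [if_pos ((PySem.Set.mem_ofList _ _).1 hr)]
  rw [rowA_eq_map]

-- invariant of B's scatter pass: rows track the growing frequency dict
theorem scatter_invariant (tasks res : List String) :
    ∀ (fmap : List (String × String × Int)) (m : PySem.Dict String (List Int))
      (d : PySem.Dict (String × String) Int),
      m.keys = PySem.Set.ofList res →
      (∀ r ∈ res, m.getD r [] = tasks.map (fun t => d.getD (t, r) 0)) →
      (fmap.foldl (bstep tasks res) m).keys = PySem.Set.ofList res ∧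
      ∀ r ∈ res, (fmap.foldl (bstep tasks res) m).getD r [] =
        tasks.map (fun t =>
          (fmap.foldl (fun d q => d.insert (q.1, q.2.1) q.2.2) d).getD (t, r) 0) := by
  intro fmap
  induction fmap with
  | nil => exact fun m d hk hg => ⟨hk, hg⟩
  | cons q fmap ih =>
    intro m d hk hg
    obtain ⟨t0, r0, v⟩ := q
    simp only [List.foldl_cons]
    by_cases hcond : (PySem.Set.contains (PySem.Set.ofList res) r0 && (posDict tasks).contains t0) = true
    · have hand := hcond
      rw [Bool.and_eq_true] at hand
      have hr0 : r0 ∈ res := by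
        simpa [PySem.Set.contains, PySem.Set.mem_ofList] using hand.1
      have ht0 : t0 ∈ tasks := by
        simpa [posDict_contains] using hand.2
      have hb : bstep tasks res m (t0, r0, v) =
          m.modify r0 [] (fun row =>
            ((posDict tasks).getD t0 []).foldl (fun row i => PySem.List.pySetD row i v) row) := by
        unfold bstep; rw [if_pos hcond]
      rw [hb]
      have hc : m.contains r0 = true := by
        rw [PySem.Dict.contains_eq_decide_mem_keys, hk]
        simp [PySem.Set.mem_ofList, hr0]
      apply ih
      · rw [PySem.Dict.keys_modify, PySem.Dict.keys_insert_of_contains _ _ hc]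
        exact hk
      · intro r hr
        rw [PySem.Dict.getD_modify]
        by_cases hrr : r = r0
        · subst hrr
          rw [if_pos rfl, hg r hr, posDict_getD, rowUpd_map]
          apply List.map_congr_left
          intro t _
          rw [PySem.Dict.getD_insert]
          by_cases htt : t = t0
          · simp [htt]
          · simp [htt, Prod.ext_iff]
        · rw [if_neg hrr, hg r hr]
          apply List.map_congr_left
          intro t _
          rw [PySem.Dict.getD_insert, if_neg (by simp [Prod.ext_iff]; intro _ h; exact absurd h hrr)]
    · have hb : bstep tasks res m (t0, r0, v) = m := by
        unfold bstep; rw [if_neg hcond]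
      rw [hb]
      apply ih _ _ hk
      intro r hr
      rw [hg r hr]
      apply List.map_congr_left
      intro t ht
      rw [PySem.Dict.getD_insert, if_neg ?_]
      intro hpair
      obtain ⟨h1, h2⟩ : t = t0 ∧ r = r0 := by simpa [Prod.ext_iff] using hpair
      subst h1; subst h2
      apply hcond
      rw [Bool.and_eq_true]
      constructor
      · simp [PySem.Set.contains, PySem.Set.mem_ofList, hr]
      · simp [posDict_contains, ht]

-- port B computes the canonical value
theorem portB_eq_canon (tasks res : List String) (fmap : List (String × String × Int)) :
    get_activity_matrix_alt tasks res fmap =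
      canon tasks res (fmap.foldl (fun d q => d.insert (q.1, q.2.1) q.2.2) PySem.Dict.empty) := by
  have hB : get_activity_matrix_alt tasks res fmap =
      (fmap.foldl (bstep tasks res)
        (res.foldl (fun d r => d.insert r (List.replicate tasks.length (0 : Int))) PySem.Dict.empty)).items := rfl
  have hm0keys : (res.foldl (fun d r => d.insert r (List.replicate tasks.length (0 : Int))) PySem.Dict.empty).keys
      = PySem.Set.ofList res := by
    rw [PySem.Dict.keys_foldl_insert, PySem.Dict.keys_empty, PySem.Set.update_nil_left]
  have hm0get : ∀ r ∈ res,
      (res.foldl (fun d r => d.insert r (List.replicate tasks.length (0 : Int))) PySem.Dict.empty).getD r []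
        = tasks.map (fun t => (PySem.Dict.empty : PySem.Dict (String × String) Int).getD (t, r) 0) := by
    intro r hr
    rw [getD_foldl_insert_fun res (fun _ => List.replicate tasks.length (0 : Int)) PySem.Dict.empty r [],
      if_pos hr]
    simp [PySem.Dict.getD_empty, List.map_const']
  obtain ⟨hkeys, hget⟩ := scatter_invariant tasks res fmap _ _ hm0keys hm0get
  rw [hB, PySem.Dict.items_eq_map_keys _ (by rw [hkeys]; exact PySem.Set.nodup_ofList _) [], hkeys]
  unfold canon
  apply List.map_congr_left
  intro r hr
  rw [hget r ((PySem.Set.mem_ofList _ _).1 hr)]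

-- ===== VERDICT (by name: the statement is the Claim_ definition above) =====
theorem get_activity_matrix_spec : Claim_equal_get_activity_matrix := by
  intro tasks res fmap _
  unfold Spec_get_activity_matrix
  rw [portA_eq_canon, portB_eq_canon]
  congr 1
  rw [show PySem.Dict.ofList (fmap.map (fun p => ((p.1, p.2.1), p.2.2))) =
      (fmap.map (fun p => ((p.1, p.2.1), p.2.2))).foldl (fun d p => d.insert p.1 p.2) PySem.Dict.empty from rfl,
    List.foldl_map]
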